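-- pv_equiv track=rewrite | github.com/ParticipaPY/politic-bots | fake_promoter.py | computations_num_intrctns
-- ===== SOURCE A (Python) =====
-- def computations_num_intrctns(user_screen_name
--     , NO_USERS, interactions):
--     """
--     Compute values related to the no. interactions of a user.
--
--     The values to be computed are:
--         - The total number of users
--         that the user 'user_screen_name'
--         started an interaction with
--         (Not counting interactions with him/herself).
--         - The total number of interactions started by a user.
--         - The number of interactions
--         with the NO_USERS most interacted users.
--     """
--     interacted_users_count = 0
--     total_interactions = 0
--     total_top_interactions = 0
--     for interaction_with, interaction_count in interactions:
--         # We only care about top NO_USERS users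
--         # different from the analyzed user for these accumulators
--         if (interacted_users_count < NO_USERS
--                 and interaction_with != user_screen_name):
--             interacted_users_count += 1
--             total_top_interactions += interaction_count
--         # Accumulate no. interactions with all users
--         total_interactions += interaction_count
--     return interacted_users_count, total_interactions, total_top_interactions
-- ===== SOURCE B (Python) =====
-- def computations_num_intrctns(user_screen_name, NO_USERS, interactions):
--     total_interactions = sum(c for _, c in interactions)
--     top = [c for w, c in interactions if w != user_screen_name][:max(NO_USERS, 0)]
--     return len(top), total_interactions, sum(top)
-- ===== Notes on version B (the rewrite author's own statement) =====
-- stated objective: simpler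
-- what changed: Replaces the single loop with three accumulators and a stateful count-bounded guard by a declarative decomposition: one sum for the total, a filtered list sliced to the first max(NO_USERS,0) entries for the top group, then len/sum of that slice.
import Mathlib
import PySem

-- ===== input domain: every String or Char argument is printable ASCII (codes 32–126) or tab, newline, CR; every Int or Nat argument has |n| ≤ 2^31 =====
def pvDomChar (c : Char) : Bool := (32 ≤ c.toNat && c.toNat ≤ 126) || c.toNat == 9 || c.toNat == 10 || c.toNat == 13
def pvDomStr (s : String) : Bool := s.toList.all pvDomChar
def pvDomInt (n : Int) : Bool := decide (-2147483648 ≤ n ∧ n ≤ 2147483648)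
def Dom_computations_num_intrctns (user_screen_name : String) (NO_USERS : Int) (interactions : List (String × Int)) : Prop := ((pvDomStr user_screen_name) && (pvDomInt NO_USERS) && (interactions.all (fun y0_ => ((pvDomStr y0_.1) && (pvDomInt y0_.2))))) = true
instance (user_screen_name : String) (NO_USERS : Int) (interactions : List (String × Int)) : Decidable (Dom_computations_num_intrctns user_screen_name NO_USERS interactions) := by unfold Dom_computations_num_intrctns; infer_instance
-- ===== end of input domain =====

-- B replaces A's single stateful loop (three accumulators, count-bounded guard) by a
-- declarative decomposition: total = sum of all counts; top = filtered counts sliced to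
-- the first max(NO_USERS,0); result = (len top, total, sum top). Objective: simpler.

-- ===== PORT A =====
-- the loop body of A: guard 'interacted_users_count < NO_USERS and interaction_with != user_screen_name'
def pvStepA (user_screen_name : String) (NO_USERS : Int) (st : Int × Int × Int) (p : String × Int) : Int × Int × Int :=
  if st.1 < NO_USERS ∧ p.1 ≠ user_screen_name then
    (st.1 + 1, st.2.1 + p.2, st.2.2 + p.2)
  else
    (st.1, st.2.1 + p.2, st.2.2)

def computations_num_intrctns (user_screen_name : String) (NO_USERS : Int) (interactions : List (String × Int)) : Int × Int × Int :=
  interactions.foldl (pvStepA user_screen_name NO_USERS) (0, 0, 0)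

-- ===== PORT B =====
def computations_num_intrctns_alt (user_screen_name : String) (NO_USERS : Int) (interactions : List (String × Int)) : Int × Int × Int :=
  let total_interactions : Int := (interactions.map Prod.snd).sum
  let top : List Int := (((interactions.filter (fun p => decide (p.1 ≠ user_screen_name))).map Prod.snd).take (max NO_USERS 0).toNat)
  ((top.length : Int), total_interactions, top.sum)

-- ===== PRECONDITION & SPEC =====
def Spec_computations_num_intrctns (user_screen_name : String) (NO_USERS : Int) (interactions : List (String × Int)) (out : Int × Int × Int) : Prop := out = computations_num_intrctns_alt user_screen_name NO_USERS interactions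
instance (user_screen_name : String) (NO_USERS : Int) (interactions : List (String × Int)) (out : Int × Int × Int) : Decidable (Spec_computations_num_intrctns user_screen_name NO_USERS interactions out) := by unfold Spec_computations_num_intrctns; infer_instance

-- ===== CLAIM (what is proved, stated in full; the proofs are below) =====
def Claim_equal_computations_num_intrctns : Prop := ∀ (user_screen_name : String) (NO_USERS : Int) (interactions : List (String × Int)), Dom_computations_num_intrctns user_screen_name NO_USERS interactions → Spec_computations_num_intrctns user_screen_name NO_USERS interactions (computations_num_intrctns user_screen_name NO_USERS interactions)

-- ===== LEMMAS AND PROOFS =====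
-- Loop invariant for A's fold: from state (c, tot, top) the fold adds the length/sum of the
-- first max(N-c,0) filtered counts to the count/top accumulators and the full sum to tot.
lemma pvLoopA (u : String) (N : Int) (xs : List (String × Int)) : ∀ (c tot top : Int),
    List.foldl (pvStepA u N) (c, tot, top) xs =
      (c + ((((xs.filter (fun p => decide (p.1 ≠ u))).map Prod.snd).take (max (N - c) 0).toNat).length : Int),
       tot + (xs.map Prod.snd).sum,
       top + (((xs.filter (fun p => decide (p.1 ≠ u))).map Prod.snd).take (max (N - c) 0).toNat).sum) := by
  induction xs with
  | nil => intro c tot top; simp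
  | cons p xs ih =>
    intro c tot top
    obtain ⟨w, k⟩ := p
    by_cases hw : w = u
    · simp [pvStepA, hw, ih, add_assoc]
    · by_cases hc : c < N
      · have hm : (max (N - c) 0).toNat = (max (N - (c + 1)) 0).toNat + 1 := by omega
        simp only [List.foldl_cons, pvStepA, hw, hc, and_true, if_pos, ne_eq,
          not_false_eq_true, decide_true, List.filter_cons_of_pos, List.map_cons, hm,
          List.take_succ_cons, ih, List.length_cons, List.sum_cons, List.map_cons]
        push_cast
        refine Prod.ext ?_ (Prod.ext ?_ ?_) <;> simp <;> ring
      · have hm : (max (N - c) 0).toNat = 0 := by omega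
        simp [pvStepA, hw, hc, ih, hm, add_assoc]

-- ===== VERDICT (by name: the statement is the Claim_ definition above) =====
theorem computations_num_intrctns_spec : Claim_equal_computations_num_intrctns := by
  intro u N xs _
  unfold Spec_computations_num_intrctns computations_num_intrctns computations_num_intrctns_alt
  rw [pvLoopA]
  simp
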